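-- pv_equiv track=rewrite | github.com/by-mav/vitaai-ios | scripts/fix-accents.py | extract_strings_and_comments
-- ===== SOURCE A (Python) =====
-- BACKSLASH = chr(92)
--
-- def extract_strings_and_comments(line):
--     """Return list of (start, end, kind) for string literals and comments."""
--     spans = []
--     i = 0
--     n = len(line)
--     while i < n:
--         if line[i:i+2] == '//':
--             spans.append((i, n, 'comment'))
--             break
--         if line[i] == '"':
--             j = i + 1
--             while j < n:
--                 if line[j] == BACKSLASH and j + 1 < n:
--                     j += 2
--                     continue
--                 if line[j] == '"':
--                     spans.append((i, j + 1, 'string'))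
--                     i = j + 1
--                     break
--                 j += 1
--             else:
--                 i = j
--                 continue
--             continue
--         i += 1
--     return spans
-- ===== SOURCE B (Python) =====
-- def extract_strings_and_comments(line):
--     """Return list of (start, end, kind) for string literals and comments."""
--     n = len(line)
--     spans = []
--     mode = 0      # 0 = code, 1 = inside string, 2 = just after backslash in string
--     start = 0     # start index of the current string literal
--     for i, c in enumerate(line):
--         if mode == 0:
--             if c == '/' and i + 1 < n and line[i + 1] == '/':
--                 spans.append((i, n, 'comment'))
--                 break
--             if c == '"':
--                 mode = 1
--                 start = i
--         elif mode == 1: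
--             if c == '\\':
--                 mode = 2
--             elif c == '"':
--                 spans.append((start, i + 1, 'string'))
--                 mode = 0
--         else:
--             mode = 1
--     return spans
-- ===== Notes on version B (the rewrite author's own statement) =====
-- stated objective: simpler
-- what changed: A's nested while loops with manual index jumps, per-position slicing and break/else/continue are replaced by a single for-loop 3-state machine (code / in-string / after-backslash) that looks at each character once.
import Mathlib
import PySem

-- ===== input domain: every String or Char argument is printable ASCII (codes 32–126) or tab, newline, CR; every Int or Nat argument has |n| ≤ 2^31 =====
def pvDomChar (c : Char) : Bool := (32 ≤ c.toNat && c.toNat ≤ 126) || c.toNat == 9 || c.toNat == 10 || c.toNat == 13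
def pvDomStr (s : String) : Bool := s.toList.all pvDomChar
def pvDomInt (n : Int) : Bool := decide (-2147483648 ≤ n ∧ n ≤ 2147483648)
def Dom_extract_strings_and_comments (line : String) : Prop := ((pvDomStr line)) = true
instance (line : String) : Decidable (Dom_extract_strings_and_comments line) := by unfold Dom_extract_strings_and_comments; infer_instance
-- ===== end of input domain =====

-- B replaces A's nested index-jumping while loops with a single-pass 3-state machine; objective: simpler/idiomatic (same cost).

-- ===== PORT A =====
-- String indexing is ported over line.toList (exact: Python str ops act on code points).
-- Each while loop becomes structural recursion on a fuel bound (fuel > remaining distance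
-- suffices: every iteration advances the index); the inner loop returns `some j` on the
-- break (closing quote at j) and `none` when it exhausts (the `else: i = j; continue`
-- then ends the outer loop since j ≥ n).
def pvInnerA (cs : List Char) (n : Nat) : Nat → Nat → Option Nat
  | 0, _ => none
  | fuel + 1, j =>
    if j < n then
      if PySem.List.pyGet? cs (j : Int) = some '\\' ∧ j + 1 < n then pvInnerA cs n fuel (j + 2)
      else if PySem.List.pyGet? cs (j : Int) = some '"' then some j
      else pvInnerA cs n fuel (j + 1)
    else none

def pvOuterA (cs : List Char) (n : Nat) : Nat → Nat → List (Int × Int × String)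
  | 0, _ => []
  | fuel + 1, i =>
    if i < n then
      if PySem.List.slice cs (some (i : Int)) (some ((i : Int) + 2)) = ['/', '/'] then
        [((i : Int), (n : Int), "comment")]
      else if PySem.List.pyGet? cs (i : Int) = some '"' then
        match pvInnerA cs n (n + 1) (i + 1) with
        | some k => ((i : Int), (k : Int) + 1, "string") :: pvOuterA cs n fuel (k + 1)
        | none => []
      else pvOuterA cs n fuel (i + 1)
    else []

def extract_strings_and_comments (line : String) : List (Int × Int × String) :=
  pvOuterA line.toList line.toList.length (line.toList.length + 1) 0

-- ===== PORT B =====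
inductive PvMode : Type
  | code | instr | esc
deriving DecidableEq, Repr

-- B's for loop over enumerate(line) with a state machine; `i + 1 < n and line[i+1] == '/'`
-- is read off the untraversed suffix as `rest.head? = some '/'` (exact: rest = line[i+1:]).
def pvGoB (n : Nat) : List Char → Nat → PvMode → Nat → List (Int × Int × String) → List (Int × Int × String)
  | [], _, _, _, spans => spans
  | c :: rest, i, m, start, spans =>
    match m with
    | .code =>
      if c = '/' ∧ rest.head? = some '/' then spans ++ [((i : Int), (n : Int), "comment")]
      else if c = '"' then pvGoB n rest (i + 1) .instr i spans
      else pvGoB n rest (i + 1) .code start spans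
    | .instr =>
      if c = '\\' then pvGoB n rest (i + 1) .esc start spans
      else if c = '"' then pvGoB n rest (i + 1) .code start (spans ++ [((start : Int), (i : Int) + 1, "string")])
      else pvGoB n rest (i + 1) .instr start spans
    | .esc => pvGoB n rest (i + 1) .instr start spans

def extract_strings_and_comments_alt (line : String) : List (Int × Int × String) :=
  pvGoB line.toList.length line.toList 0 .code 0 []

-- ===== PRECONDITION & SPEC =====
def Spec_extract_strings_and_comments (line : String) (out : List (Int × Int × String)) : Prop := out = extract_strings_and_comments_alt line
instance (line : String) (out : List (Int × Int × String)) : Decidable (Spec_extract_strings_and_comments line out) := by unfold Spec_extract_strings_and_comments; infer_instance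

-- ===== CLAIM (what is proved, stated in full; the proofs are below) =====
def Claim_equal_extract_strings_and_comments : Prop := ∀ (line : String), Dom_extract_strings_and_comments line → Spec_extract_strings_and_comments line (extract_strings_and_comments line)

-- ===== LEMMAS AND PROOFS =====

theorem pv_take_one_eq (rest : List Char) : rest.take 1 = ['/'] ↔ rest.head? = some '/' := by
  cases rest <;> simp

theorem pvInnerA_stop (cs : List Char) (n : Nat) (f j : Nat) (h : ¬ j < n) :
    pvInnerA cs n f j = none := by
  cases f with
  | zero => rfl
  | succ f => rw [pvInnerA, if_neg h]

theorem pvMain (cs : List Char) : ∀ (m i : Nat), cs.length - i ≤ m →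
    (∀ f, cs.length - i < f → ∀ start spans,
      pvGoB cs.length (cs.drop i) i .code start spans = spans ++ pvOuterA cs cs.length f i) ∧
    (∀ f g, cs.length - i < f → cs.length - i ≤ g → ∀ s spans,
      pvGoB cs.length (cs.drop i) i .instr s spans =
        spans ++ (match pvInnerA cs cs.length f i with
                  | some k => ((s : Int), (k : Int) + 1, "string") :: pvOuterA cs cs.length g (k + 1)
                  | none => [])) := by
  intro m
  induction m with
  | zero =>
    intro i hm
    have hemp : cs.drop i = [] := List.drop_eq_nil_of_le (by omega)
    constructor
    · intro f hf start spans
      obtain ⟨f', rfl⟩ : ∃ f', f = f' + 1 := ⟨f - 1, by omega⟩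
      rw [hemp, pvOuterA, if_neg (by omega)]
      simp [pvGoB]
    · intro f g hf hg s spans
      rw [hemp, pvInnerA_stop cs cs.length f i (by omega)]
      simp [pvGoB]
  | succ m ih =>
    intro i hm
    by_cases hi : i < cs.length
    · have hd : cs.drop i = cs[i] :: cs.drop (i + 1) := List.drop_eq_getElem_cons hi
      have hget : PySem.List.pyGet? cs (i : Int) = cs[i]? := by
        simp [PySem.List.pyGet?_natCast]
      have hgetv : cs[i]? = some cs[i] := List.getElem?_eq_getElem hi
      constructor
      · intro f hf start spans
        obtain ⟨f', rfl⟩ : ∃ f', f = f' + 1 := ⟨f - 1, by omega⟩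
        rw [hd]
        simp only [pvGoB]
        rw [pvOuterA, if_pos hi]
        have hslice : PySem.List.slice cs (some (i : Int)) (some ((i : Int) + 2)) = (cs.drop i).take 2 := by
          exact_mod_cast PySem.List.slice_natCast_add cs i 2
        rw [hslice, hd, List.take_succ_cons]
        by_cases hc : cs[i] = '/' ∧ (cs.drop (i + 1)).head? = some '/'
        · have hcA : cs[i] :: List.take 1 (cs.drop (i + 1)) = ['/', '/'] := by
            rw [hc.1, (pv_take_one_eq _).2 hc.2]
          rw [if_pos hc, if_pos hcA]
        · have hcA : ¬(cs[i] :: List.take 1 (cs.drop (i + 1)) = ['/', '/']) := by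
            intro hh
            injection hh with h1 h2
            exact hc ⟨h1, (pv_take_one_eq _).1 h2⟩
          rw [if_neg hc, if_neg hcA]
          by_cases hq : cs[i] = '"'
          · have hqA : PySem.List.pyGet? cs (i : Int) = some '"' := by rw [hget, hgetv, hq]
            rw [if_pos hq, if_pos hqA]
            rw [(ih (i + 1) (by omega)).2 (cs.length + 1) f' (by omega) (by omega) i spans]
          · have hqA : ¬(PySem.List.pyGet? cs (i : Int) = some '"') := by
              rw [hget, hgetv]; intro hh; exact hq (Option.some.inj hh)
            rw [if_neg hq, if_neg hqA]
            exact (ih (i + 1) (by omega)).1 f' (by omega) start spans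
      · intro f g hf hg s spans
        obtain ⟨f', rfl⟩ : ∃ f', f = f' + 1 := ⟨f - 1, by omega⟩
        rw [hd]
        simp only [pvGoB]
        rw [pvInnerA, if_pos hi]
        by_cases hb : cs[i] = '\\'
        · have hbA : PySem.List.pyGet? cs (i : Int) = some '\\' := by rw [hget, hgetv, hb]
          by_cases h1 : i + 1 < cs.length
          · rw [if_pos hb, if_pos ⟨hbA, h1⟩]
            have hd1 : cs.drop (i + 1) = cs[i + 1] :: cs.drop (i + 2) := List.drop_eq_getElem_cons h1
            rw [hd1]
            simp only [pvGoB]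
            exact (ih (i + 2) (by omega)).2 f' g (by omega) (by omega) s spans
          · rw [if_pos hb, if_neg (fun hh => h1 hh.2)]
            rw [if_neg (by
              rw [hget, hgetv]
              intro hh
              have h2 := Option.some.inj hh
              rw [hb] at h2
              exact absurd h2 (by decide))]
            rw [pvInnerA_stop cs cs.length f' (i + 1) (by omega)]
            rw [List.drop_eq_nil_of_le (by omega)]
            simp [pvGoB]
        · rw [if_neg hb]
          by_cases hq : cs[i] = '"'
          · rw [if_pos hq, if_neg (by rw [hget, hgetv]; intro hh; exact hb (Option.some.inj hh.1))]
            rw [if_pos (by rw [hget, hgetv, hq])]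
            rw [(ih (i + 1) (by omega)).1 g (by omega) s (spans ++ [((s : Int), (i : Int) + 1, "string")])]
            simp
          · rw [if_neg hq]
            rw [if_neg (by rw [hget, hgetv]; intro hh; exact hb (Option.some.inj hh.1))]
            rw [if_neg (by rw [hget, hgetv]; intro hh; exact hq (Option.some.inj hh))]
            exact (ih (i + 1) (by omega)).2 f' g (by omega) (by omega) s spans
    · have hemp : cs.drop i = [] := List.drop_eq_nil_of_le (by omega)
      constructor
      · intro f hf start spans
        obtain ⟨f', rfl⟩ : ∃ f', f = f' + 1 := ⟨f - 1, by omega⟩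
        rw [hemp, pvOuterA, if_neg (by omega)]
        simp [pvGoB]
      · intro f g hf hg s spans
        rw [hemp, pvInnerA_stop cs cs.length f i (by omega)]
        simp [pvGoB]

-- ===== VERDICT (by name: the statement is the Claim_ definition above) =====
theorem extract_strings_and_comments_spec : Claim_equal_extract_strings_and_comments := by
  intro line _
  unfold Spec_extract_strings_and_comments extract_strings_and_comments extract_strings_and_comments_alt
  have h := (pvMain line.toList (line.toList.length) 0 (by omega)).1 (line.toList.length + 1) (by omega) 0 []
  simpa using h.symm
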